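-- pv_equiv track=rewrite | github.com/lzz775519441/nano-vllm | nanovllm/engine/model_runner.py | _pad_lens
-- ===== SOURCE A (Python) =====
-- def _pad_lens(num_seqs: int, num_tokens: int, max_len: int) -> list[int]:
--     if num_seqs == 0:
--         assert num_tokens == 0
--         return []
--     base, extra = divmod(num_tokens, num_seqs)
--     lens = [base + (i < extra) for i in range(num_seqs)]
--     assert all(0 < x <= max_len for x in lens)
--     return lens
-- ===== SOURCE B (Python) =====
-- def _pad_lens(num_seqs: int, num_tokens: int, max_len: int) -> list[int]:
--     if num_seqs == 0:
--         assert num_tokens == 0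
--         return []
--     # Greedy apportionment: give the current sequence the ceiling of what
--     # remains divided by the sequences left; no divmod/base/extra needed.
--     lens = []
--     rem = num_tokens
--     for k in range(num_seqs, 0, -1):
--         take = -(-rem // k)
--         lens.append(take)
--         rem -= take
--     assert all(0 < x <= max_len for x in lens)
--     return lens
-- ===== Notes on version B (the rewrite author's own statement) =====
-- stated objective: alternative
-- what changed: B replaces A's divmod-then-comprehension (base + (i<extra) per index) by a greedy apportionment loop with a running remainder: for k = num_seqs..1 it takes ceil(rem/k) and subtracts it, so no base/extra is ever computed.
-- outside the precondition, e.g. on _pad_lens(0, 1, 5): A raises AssertionError, B raises AssertionError; on _pad_lens(3, 7, 2): A raises AssertionError, B raises AssertionError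
import Mathlib
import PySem

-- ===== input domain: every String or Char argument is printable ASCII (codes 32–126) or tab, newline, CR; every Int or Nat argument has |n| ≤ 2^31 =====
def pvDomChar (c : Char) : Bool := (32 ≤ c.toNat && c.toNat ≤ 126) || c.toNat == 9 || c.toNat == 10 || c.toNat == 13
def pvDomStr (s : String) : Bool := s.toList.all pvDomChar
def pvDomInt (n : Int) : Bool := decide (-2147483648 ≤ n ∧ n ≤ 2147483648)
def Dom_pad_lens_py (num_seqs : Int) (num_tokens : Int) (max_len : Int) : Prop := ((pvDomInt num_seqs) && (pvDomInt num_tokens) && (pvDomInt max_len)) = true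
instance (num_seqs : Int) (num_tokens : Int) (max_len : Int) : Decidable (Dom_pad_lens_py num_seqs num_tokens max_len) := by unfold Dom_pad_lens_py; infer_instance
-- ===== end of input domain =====

-- ===== PORT A =====
-- B replaces A's divmod-then-comprehension by a greedy apportionment loop (running
-- remainder, ceiling division by the number of sequences left); same cost, different algorithm.
-- Neither function mutates its arguments; equivalence is about the return value.
def pad_lens_py (num_seqs : Int) (num_tokens : Int) (max_len : Int) : List Int :=
  if num_seqs = 0 then []
  else
    let base := PySem.Int.floordiv num_tokens num_seqs
    let extra := PySem.Int.mod num_tokens num_seqs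
    (PySem.List.pyRange 0 num_seqs 1).map (fun i => base + (if i < extra then 1 else 0))

-- ===== PORT B =====
-- loop body of Source B: take = -(-rem // k); lens.append(take); rem -= take
def pvGreedyStep (acc : List Int × Int) (k : Int) : List Int × Int :=
  let take := -(PySem.Int.floordiv (-acc.2) k)
  (acc.1 ++ [take], acc.2 - take)

def pad_lens_py_alt (num_seqs : Int) (num_tokens : Int) (max_len : Int) : List Int :=
  if num_seqs = 0 then []
  else
    ((PySem.List.pyRange num_seqs 0 (-1)).foldl pvGreedyStep ([], num_tokens)).1

-- ===== PRECONDITION & SPEC =====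
-- Pre_ excludes exactly the inputs on which A's assert statements raise AssertionError
-- (B's identical asserts raise on exactly the same inputs): num_seqs == 0 with
-- num_tokens != 0, and positive num_seqs whose computed lens contain a value
-- outside (0, max_len].
def Pre_pad_lens_py (num_seqs : Int) (num_tokens : Int) (max_len : Int) : Prop :=
  (num_seqs = 0 → num_tokens = 0) ∧
  (0 < num_seqs →
    1 ≤ PySem.Int.floordiv num_tokens num_seqs ∧
    PySem.Int.floordiv num_tokens num_seqs ≤ max_len ∧
    (0 < PySem.Int.mod num_tokens num_seqs → PySem.Int.floordiv num_tokens num_seqs + 1 ≤ max_len))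
instance (num_seqs : Int) (num_tokens : Int) (max_len : Int) : Decidable (Pre_pad_lens_py num_seqs num_tokens max_len) := by unfold Pre_pad_lens_py; infer_instance
def pvWitness_pad_lens_py : Int × Int × Int := (3, 7, 5)

def Spec_pad_lens_py (num_seqs : Int) (num_tokens : Int) (max_len : Int) (out : List Int) : Prop := out = pad_lens_py_alt num_seqs num_tokens max_len
instance (num_seqs : Int) (num_tokens : Int) (max_len : Int) (out : List Int) : Decidable (Spec_pad_lens_py num_seqs num_tokens max_len out) := by unfold Spec_pad_lens_py; infer_instance

-- ===== CLAIM (what is proved, stated in full; the proofs are below) =====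
def Claim_equal_pad_lens_py : Prop := ∀ (num_seqs : Int) (num_tokens : Int) (max_len : Int), Dom_pad_lens_py num_seqs num_tokens max_len → Pre_pad_lens_py num_seqs num_tokens max_len → Spec_pad_lens_py num_seqs num_tokens max_len (pad_lens_py num_seqs num_tokens max_len)

-- ===== LEMMAS AND PROOFS =====

-- The greedy loop over k = m..1 produces exactly the extras-first divmod split of rem over m.
theorem greedy_loop (m : Nat) : ∀ (rem : Int) (pre : List Int),
    ((PySem.List.pyRange (m : Int) 0 (-1)).foldl pvGreedyStep (pre, rem)).1
      = pre ++ (PySem.List.pyRange 0 (m : Int) 1).map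
          (fun i => PySem.Int.floordiv rem m + if i < PySem.Int.mod rem m then 1 else 0) := by
  induction m with
  | zero => intro rem pre; simp [PySem.List.pyRange_neg_one_eq_nil, PySem.List.pyRange_one_eq_nil]
  | succ m ih =>
    intro rem pre
    have hM : (0:Int) < (m:Int) + 1 := by positivity
    set M : Int := (m:Int) + 1 with hMdef
    have hb : PySem.Int.floordiv rem M = PySem.Int.floordiv rem M := rfl
    generalize hbq : PySem.Int.floordiv rem M = b at *
    generalize heq : PySem.Int.mod rem M = e at *
    have he0 : 0 ≤ e := heq ▸ PySem.Int.mod_nonneg rem hM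
    have he1 : e < M := heq ▸ PySem.Int.mod_lt rem hM
    have hrem : b * M + e = rem := by
      have := PySem.Int.floordiv_mul_add_mod rem M
      rw [hbq, heq] at this; exact this
    have ht : -(PySem.Int.floordiv (-rem) M) = b + (if 0 < e then 1 else 0) := by
      rw [PySem.Int.neg_floordiv_neg_eq_iff_of_pos hM]
      split_ifs with h
      · constructor <;> nlinarith
      · constructor <;> nlinarith
    have hcast : (((m+1 : Nat)) : Int) = M := by push_cast; rw [hMdef]
    rw [hcast, PySem.List.pyRange_neg_one_cons hM]
    rw [List.foldl_cons]
    show ((PySem.List.pyRange (M - 1) 0 (-1)).foldl pvGreedyStep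
        (pre ++ [-(PySem.Int.floordiv (-rem) M)], rem - -(PySem.Int.floordiv (-rem) M))).1 = _
    have hM1 : M - 1 = (m : Int) := by omega
    rw [hM1, ht, ih]
    set t : Int := b + (if 0 < e then 1 else 0) with htdef
    rcases Nat.eq_zero_or_pos m with hm0 | hmpos
    · subst hm0
      have he2 : e = 0 := by omega
      have : M = 0 + 1 := by omega
      rw [this, PySem.List.pyRange_one_singleton]
      simp [PySem.List.pyRange_one_eq_nil, htdef, he2]
      omega
    · have hmZ : (0:Int) < (m:Int) := by exact_mod_cast hmpos
      set e' : Int := e - (if 0 < e then 1 else 0) with he'def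
      have hremt : rem - t = b * (m:Int) + e' := by
        rw [htdef, he'def]; split_ifs <;> nlinarith
      have he'0 : 0 ≤ e' := by rw [he'def]; split_ifs <;> omega
      have he'1 : e' < (m:Int) := by rw [he'def]; split_ifs <;> omega
      have hb' : PySem.Int.floordiv (rem - t) (m:Int) = b := by
        rw [PySem.Int.floordiv_eq_iff_of_pos hmZ]
        constructor <;> nlinarith
      have he'' : PySem.Int.mod (rem - t) (m:Int) = e' := by
        have := PySem.Int.floordiv_mul_add_mod (rem - t) (m:Int)
        rw [hb'] at this; omega
      rw [hb', he'']
      rw [PySem.List.pyRange_one_cons hM, List.map_cons]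
      have htail : (PySem.List.pyRange 0 (m:Int) 1).map (fun i => b + if i < e' then 1 else 0)
          = (PySem.List.pyRange (0+1) M 1).map (fun i => b + if i < e then 1 else 0) := by
        rw [PySem.List.pyRange_one 0 (m:Int), PySem.List.pyRange_one (0+1) M,
          List.map_map, List.map_map]
        have hlen : ((m:Int) - 0).toNat = (M - (0+1)).toNat := by omega
        rw [hlen]
        apply List.map_congr_left
        intro k _
        simp only [Function.comp_apply]
        have hiff : (0:Int) + k < e' ↔ (0:Int) + 1 + k < e := by
          rw [he'def]; split_ifs <;> omega
        split_ifs <;> omega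
      rw [List.append_assoc, htail]
      simp only [hbq, heq]
      simp [htdef]

-- ===== VERDICT (by name: the statement is the Claim_ definition above) =====
theorem pad_lens_py_spec : Claim_equal_pad_lens_py := by
  intro ns nt ml _ _
  unfold Spec_pad_lens_py pad_lens_py pad_lens_py_alt
  by_cases h0 : ns = 0
  · simp [h0]
  · simp only [if_neg h0]
    rcases lt_trichotomy ns 0 with hneg | hz | hpos
    · have hrB : PySem.List.pyRange ns 0 (-1) = [] :=
        PySem.List.pyRange_neg_one_eq_nil (le_of_lt hneg)
      have hrA : PySem.List.pyRange 0 ns 1 = [] :=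
        PySem.List.pyRange_one_eq_nil (le_of_lt hneg)
      simp [hrA, hrB]
    · exact absurd hz h0
    · have hcast : ((ns.toNat : Int)) = ns := Int.toNat_of_nonneg (le_of_lt hpos)
      have := greedy_loop ns.toNat nt []
      rw [hcast] at this
      rw [this]
      simp
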